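-- pv_equiv track=rewrite | github.com/Wochozka/morse | morse.py | remove_blanks
-- ===== SOURCE A (Python) =====
-- def remove_blanks(lst):
--
--     # Remove 2+ spaces or empty values to one
--     result = []
--     prev_blank = False
--     for item in lst:
--         if item == '':
--             if not prev_blank:
--                 result.append(item)
--             prev_blank = True
--         else:
--             result.append(item)
--             prev_blank = False
--     return result
-- ===== SOURCE B (Python) =====
-- def remove_blanks(lst):
--     # Run-based rewrite: skip over each maximal run of '' in one inner loop,
--     # emitting a single '', instead of tracking a prev_blank flag per element.
--     result = []
--     i = 0
--     n = len(lst)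
--     while i < n:
--         if lst[i] == '':
--             result.append('')
--             while i < n and lst[i] == '':
--                 i += 1
--         else:
--             result.append(lst[i])
--             i += 1
--     return result
-- ===== Notes on version B (the rewrite author's own statement) =====
-- stated objective: alternative
-- what changed: Replaces the per-element prev_blank flag with run-based processing: an inner loop skips each maximal run of '' and emits a single '', non-blank items are copied directly.
import Mathlib
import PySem

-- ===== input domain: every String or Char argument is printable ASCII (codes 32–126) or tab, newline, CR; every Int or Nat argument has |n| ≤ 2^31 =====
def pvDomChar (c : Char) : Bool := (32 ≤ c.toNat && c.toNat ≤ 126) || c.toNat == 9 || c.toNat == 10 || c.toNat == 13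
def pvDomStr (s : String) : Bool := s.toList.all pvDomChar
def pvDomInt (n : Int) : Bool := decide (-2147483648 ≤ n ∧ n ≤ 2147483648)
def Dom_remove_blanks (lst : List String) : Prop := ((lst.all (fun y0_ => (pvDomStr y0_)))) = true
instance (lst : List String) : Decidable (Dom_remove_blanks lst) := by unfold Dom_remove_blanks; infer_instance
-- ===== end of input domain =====

-- B replaces A's per-element prev_blank flag with run-based processing (skip each maximal run of '' emitting one ''); same O(n) cost, different decomposition.


-- ===== PORT A =====
-- fold carries (result, prev_blank) exactly as A's loop does
def remove_blanks (lst : List String) : List String :=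
  (lst.foldl (fun (st : List String × Bool) item =>
      if item = "" then
        (if !st.2 then st.1 ++ [item] else st.1, true)
      else
        (st.1 ++ [item], false))
    ([], false)).1

-- ===== PORT B =====
-- inner while loop of Source B: skip the leading run of ''
def rbSkipBlanks : List String → List String
  | [] => []
  | x :: xs => if x = "" then rbSkipBlanks xs else x :: xs

theorem rbSkipBlanks_length_le : ∀ (xs : List String), (rbSkipBlanks xs).length ≤ xs.length
  | [] => le_refl _
  | x :: xs => by
      simp only [rbSkipBlanks]
      split
      · exact le_trans (rbSkipBlanks_length_le xs) (Nat.le_succ _)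
      · exact le_refl _

-- outer while loop of Source B
def remove_blanks_alt (lst : List String) : List String :=
  match lst with
  | [] => []
  | x :: xs =>
      if x = "" then "" :: remove_blanks_alt (rbSkipBlanks xs)
      else x :: remove_blanks_alt xs
termination_by lst.length
decreasing_by
  · simpa using Nat.lt_succ_of_le (rbSkipBlanks_length_le xs)
  · simp

-- ===== PRECONDITION & SPEC =====
def Spec_remove_blanks (lst : List String) (out : List String) : Prop := out = remove_blanks_alt lst
instance (lst : List String) (out : List String) : Decidable (Spec_remove_blanks lst out) := by unfold Spec_remove_blanks; infer_instance

-- ===== CLAIM (what is proved, stated in full; the proofs are below) =====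
def Claim_equal_remove_blanks : Prop := ∀ (lst : List String), Dom_remove_blanks lst → Spec_remove_blanks lst (remove_blanks lst)

-- ===== LEMMAS AND PROOFS =====
-- A's loop body, named for the invariant lemma
def rbStep (st : List String × Bool) (item : String) : List String × Bool :=
  if item = "" then
    (if !st.2 then st.1 ++ [item] else st.1, true)
  else
    (st.1 ++ [item], false)

theorem rb_invariant : ∀ (n : ℕ) (lst : List String), lst.length ≤ n → ∀ (acc : List String),
    (lst.foldl rbStep (acc, false)).1 = acc ++ remove_blanks_alt lst ∧
    (lst.foldl rbStep (acc, true)).1 = acc ++ remove_blanks_alt (rbSkipBlanks lst) := by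
  intro n
  induction n with
  | zero =>
      intro lst hl acc
      have : lst = [] := List.length_eq_zero_iff.mp (Nat.le_zero.mp hl)
      subst this
      simp [remove_blanks_alt, rbSkipBlanks]
  | succ n ih =>
      intro lst hl acc
      match lst with
      | [] => simp [remove_blanks_alt, rbSkipBlanks]
      | x :: xs =>
          have hxs : xs.length ≤ n := Nat.le_of_succ_le_succ hl
          by_cases hx : x = ""
          · subst hx
            constructor
            · simp only [List.foldl_cons, rbStep]
              rw [remove_blanks_alt]
              
              have := (ih xs hxs (acc ++ [""])).2
              simpa using this
            · simp only [List.foldl_cons, rbStep]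
              have hsk : rbSkipBlanks ("" :: xs) = rbSkipBlanks xs := by
                simp [rbSkipBlanks]
              rw [hsk]
              exact (ih xs hxs acc).2
          · constructor
            · simp only [List.foldl_cons, rbStep, if_neg hx]
              rw [remove_blanks_alt]
              simp only [if_neg hx]
              have := (ih xs hxs (acc ++ [x])).1
              simpa using this
            · simp only [List.foldl_cons, rbStep, if_neg hx]
              have hsk : rbSkipBlanks (x :: xs) = x :: xs := by
                simp [rbSkipBlanks, hx]
              rw [hsk, remove_blanks_alt]
              simp only [if_neg hx]
              have := (ih xs hxs (acc ++ [x])).1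
              simpa using this

theorem remove_blanks_eq_step (lst : List String) :
    remove_blanks lst = (lst.foldl rbStep ([], false)).1 := rfl

-- ===== VERDICT (by name: the statement is the Claim_ definition above) =====
theorem remove_blanks_spec : Claim_equal_remove_blanks := by
  intro lst _
  unfold Spec_remove_blanks
  rw [remove_blanks_eq_step]
  simpa using (rb_invariant lst.length lst (le_refl _) []).1
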